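-- pv_equiv track=rewrite | github.com/kotechile/_domain_analysis | backend/src/services/external_apis.py | _extract_keyword_themes
-- ===== SOURCE A (Python) =====
-- from typing import Dict, Any, Optional, List
--
-- def _extract_keyword_themes(keywords: List[Dict[str, Any]]) -> Dict[str, List[str]]:
--     """Extract themes from keywords"""
--     themes = {}
--
--     for kw in keywords:
--         keyword = kw.get('keyword', '').lower()
--
--         # Define theme patterns
--         if any(word in keyword for word in ['api', 'integration', 'developer']):
--             themes.setdefault('Developer/API Content', []).append(kw.get('keyword', ''))
--         elif any(word in keyword for word in ['tool', 'calculator', 'checker']):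
--             themes.setdefault('Tools & Calculators', []).append(kw.get('keyword', ''))
--         elif any(word in keyword for word in ['guide', 'tutorial', 'how to']):
--             themes.setdefault('Educational Content', []).append(kw.get('keyword', ''))
--         elif any(word in keyword for word in ['seo', 'marketing', 'optimization']):
--             themes.setdefault('SEO & Marketing', []).append(kw.get('keyword', ''))
--         elif any(word in keyword for word in ['analysis', 'report', 'audit']):
--             themes.setdefault('Analysis & Reporting', []).append(kw.get('keyword', ''))
--         else:
--             themes.setdefault('General Content', []).append(kw.get('keyword', ''))
--
--     return themes
-- ===== SOURCE B (Python) =====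
-- from typing import Dict, Any, List
--
-- _THEMES = [
--     ('Developer/API Content', ('api', 'integration', 'developer')),
--     ('Tools & Calculators', ('tool', 'calculator', 'checker')),
--     ('Educational Content', ('guide', 'tutorial', 'how to')),
--     ('SEO & Marketing', ('seo', 'marketing', 'optimization')),
--     ('Analysis & Reporting', ('analysis', 'report', 'audit')),
-- ]
--
-- def _theme_of(lowered: str) -> str:
--     matches = [name for name, words in _THEMES if any(w in lowered for w in words)]
--     return matches[0] if matches else 'General Content'
--
-- def _extract_keyword_themes(keywords: List[Dict[str, Any]]) -> Dict[str, List[str]]: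
--     # staged group-by: label every keyword, fix the theme order by first occurrence,
--     # then collect each theme's bucket with one filter pass per theme
--     labeled = [(_theme_of(kw.get('keyword', '').lower()), kw.get('keyword', '')) for kw in keywords]
--     order = list(dict.fromkeys(name for name, _ in labeled))
--     return {name: [text for n, text in labeled if n == name] for name in order}
-- ===== Notes on version B (the rewrite author's own statement) =====
-- stated objective: alternative
-- what changed: Replaces A's single pass that grows a dict via an if/elif cascade with setdefault/append by three staged passes: label every keyword with its theme, dedup the labels via dict.fromkeys to fix the theme order, then build each theme's bucket with one filter pass per theme.
import Mathlib
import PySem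

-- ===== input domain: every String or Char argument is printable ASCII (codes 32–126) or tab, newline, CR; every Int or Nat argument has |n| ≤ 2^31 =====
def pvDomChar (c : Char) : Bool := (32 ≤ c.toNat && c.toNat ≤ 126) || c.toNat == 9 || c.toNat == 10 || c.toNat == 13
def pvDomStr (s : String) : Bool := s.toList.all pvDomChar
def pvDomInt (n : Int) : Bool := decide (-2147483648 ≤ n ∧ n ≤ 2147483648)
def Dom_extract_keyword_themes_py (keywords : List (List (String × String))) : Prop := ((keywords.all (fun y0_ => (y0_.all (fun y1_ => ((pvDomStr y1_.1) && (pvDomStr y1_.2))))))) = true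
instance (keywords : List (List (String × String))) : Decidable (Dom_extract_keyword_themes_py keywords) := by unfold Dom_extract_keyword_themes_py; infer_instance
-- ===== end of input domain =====

-- B replaces A's single-pass dict accumulator with an if/elif cascade by three staged passes:
-- label every keyword, dedup the labels for the theme order, then one filter pass per theme (objective: alternative).

-- ===== PORT A =====
def extract_keyword_themes_py (keywords : List (List (String × String))) : List (String × List String) :=
  (keywords.foldl (fun themes kw =>
    let keyword := PySem.Str.lower ((PySem.Dict.mk kw).getD "keyword" "")
    if (["api", "integration", "developer"] : List String).any (fun w => PySem.Str.isIn w keyword) then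
      themes.modify "Developer/API Content" [] (fun l => l ++ [(PySem.Dict.mk kw).getD "keyword" ""])
    else if (["tool", "calculator", "checker"] : List String).any (fun w => PySem.Str.isIn w keyword) then
      themes.modify "Tools & Calculators" [] (fun l => l ++ [(PySem.Dict.mk kw).getD "keyword" ""])
    else if (["guide", "tutorial", "how to"] : List String).any (fun w => PySem.Str.isIn w keyword) then
      themes.modify "Educational Content" [] (fun l => l ++ [(PySem.Dict.mk kw).getD "keyword" ""])
    else if (["seo", "marketing", "optimization"] : List String).any (fun w => PySem.Str.isIn w keyword) then
      themes.modify "SEO & Marketing" [] (fun l => l ++ [(PySem.Dict.mk kw).getD "keyword" ""])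
    else if (["analysis", "report", "audit"] : List String).any (fun w => PySem.Str.isIn w keyword) then
      themes.modify "Analysis & Reporting" [] (fun l => l ++ [(PySem.Dict.mk kw).getD "keyword" ""])
    else
      themes.modify "General Content" [] (fun l => l ++ [(PySem.Dict.mk kw).getD "keyword" ""])
  ) (PySem.Dict.empty : PySem.Dict String (List String))).items

-- ===== PORT B =====
def pvThemeTable : List (String × List String) :=
  [("Developer/API Content", ["api", "integration", "developer"]),
   ("Tools & Calculators", ["tool", "calculator", "checker"]),
   ("Educational Content", ["guide", "tutorial", "how to"]),
   ("SEO & Marketing", ["seo", "marketing", "optimization"]),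
   ("Analysis & Reporting", ["analysis", "report", "audit"])]

def pvThemeOf (lowered : String) : String :=
  let hits := (pvThemeTable.filter (fun p => p.2.any (fun w => PySem.Str.isIn w lowered))).map (·.1)
  match hits with
  | [] => "General Content"
  | m :: _ => m

def extract_keyword_themes_py_alt (keywords : List (List (String × String))) : List (String × List String) :=
  let labeled := keywords.map (fun kw =>
    let text := (PySem.Dict.mk kw).getD "keyword" ""
    (pvThemeOf (PySem.Str.lower text), text))
  let order := PySem.List.dedup (labeled.map (·.1))
  order.map (fun name => (name, (labeled.filter (fun p => p.1 == name)).map (·.2)))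

-- ===== PRECONDITION & SPEC =====
def Spec_extract_keyword_themes_py (keywords : List (List (String × String))) (out : List (String × List String)) : Prop := out = extract_keyword_themes_py_alt keywords
instance (keywords : List (List (String × String))) (out : List (String × List String)) : Decidable (Spec_extract_keyword_themes_py keywords out) := by unfold Spec_extract_keyword_themes_py; infer_instance

-- ===== CLAIM =====
def Claim_equal_extract_keyword_themes_py : Prop := ∀ (keywords : List (List (String × String))), Dom_extract_keyword_themes_py keywords → Spec_extract_keyword_themes_py keywords (extract_keyword_themes_py keywords)

-- ===== LEMMAS AND PROOFS =====

-- A's per-keyword if/elif cascade assigns exactly the theme B's classifier computes.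
theorem foldA_eq_modify (themes : PySem.Dict String (List String)) (kw : List (String × String)) :
    (let keyword := PySem.Str.lower ((PySem.Dict.mk kw).getD "keyword" "")
     if (["api", "integration", "developer"] : List String).any (fun w => PySem.Str.isIn w keyword) then
       themes.modify "Developer/API Content" [] (fun l => l ++ [(PySem.Dict.mk kw).getD "keyword" ""])
     else if (["tool", "calculator", "checker"] : List String).any (fun w => PySem.Str.isIn w keyword) then
       themes.modify "Tools & Calculators" [] (fun l => l ++ [(PySem.Dict.mk kw).getD "keyword" ""])
     else if (["guide", "tutorial", "how to"] : List String).any (fun w => PySem.Str.isIn w keyword) then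
       themes.modify "Educational Content" [] (fun l => l ++ [(PySem.Dict.mk kw).getD "keyword" ""])
     else if (["seo", "marketing", "optimization"] : List String).any (fun w => PySem.Str.isIn w keyword) then
       themes.modify "SEO & Marketing" [] (fun l => l ++ [(PySem.Dict.mk kw).getD "keyword" ""])
     else if (["analysis", "report", "audit"] : List String).any (fun w => PySem.Str.isIn w keyword) then
       themes.modify "Analysis & Reporting" [] (fun l => l ++ [(PySem.Dict.mk kw).getD "keyword" ""])
     else
       themes.modify "General Content" [] (fun l => l ++ [(PySem.Dict.mk kw).getD "keyword" ""]))
    = themes.modify (pvThemeOf (PySem.Str.lower ((PySem.Dict.mk kw).getD "keyword" ""))) []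
        (fun l => l ++ [(PySem.Dict.mk kw).getD "keyword" ""]) := by
  simp only [pvThemeOf, pvThemeTable, List.filter_cons, List.filter_nil]
  split_ifs <;> simp_all

-- The grouping loop 'd.modify key [] append' over labeled pairs yields, as items,
-- the deduped labels each paired with its filtered bucket (B's staged form).
theorem grouped_items {β : Type} (f : β → String × String) (l : List β) :
    (l.foldl (fun d kw => PySem.Dict.modify d (f kw).1 [] (fun v => v ++ [(f kw).2]))
        (PySem.Dict.empty : PySem.Dict String (List String))).items
    = (PySem.List.dedup ((l.map f).map (·.1))).map
        (fun name => (name, ((l.map f).filter (fun p => p.1 == name)).map (·.2))) := by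
  have hfold : (l.foldl (fun d kw => PySem.Dict.modify d (f kw).1 [] (fun v => v ++ [(f kw).2]))
      (PySem.Dict.empty : PySem.Dict String (List String)))
      = ((l.map f).foldl (fun d p => PySem.Dict.modify d p.1 [] (fun v => v ++ [p.2]))
      (PySem.Dict.empty : PySem.Dict String (List String))) := by rw [List.foldl_map]
  rw [hfold]
  have hnd := PySem.Dict.nodup_keys_foldl_modify_key (l.map f) (·.1) []
    (fun _ p => (fun v => v ++ [p.2])) (PySem.Dict.empty : PySem.Dict String (List String))
    (by simp)
  rw [PySem.Dict.items_eq_map_keys _ hnd ([] : List String)]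
  have hkeys := PySem.Dict.keys_foldl_modify_key (l.map f) (·.1) []
    (fun _ p => (fun v => v ++ [p.2])) (PySem.Dict.empty : PySem.Dict String (List String))
  rw [hkeys]
  simp only [PySem.Dict.keys_empty, PySem.Set.update_nil_left, PySem.List.dedup_eq_ofList]
  refine List.map_congr_left (fun name _ => ?_)
  rw [PySem.Dict.getD_foldl_modify_append, PySem.Dict.getD_empty]
  simp

-- ===== VERDICT =====
theorem extract_keyword_themes_py_spec : Claim_equal_extract_keyword_themes_py := by
  intro keywords _
  unfold Spec_extract_keyword_themes_py extract_keyword_themes_py extract_keyword_themes_py_alt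
  simp only [foldA_eq_modify]
  exact grouped_items (fun kw => (pvThemeOf (PySem.Str.lower ((PySem.Dict.mk kw).getD "keyword" "")),
    (PySem.Dict.mk kw).getD "keyword" "")) keywords
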